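-- pv_equiv track=rewrite | github.com/harendranrs/experiment | main.py | separate_comments_from_code
-- ===== SOURCE A (Python) =====
-- def separate_comments_from_code(code_with_comments):
--     code_comment_dict = {}
--     current_comment = None
--
--     for line in code_with_comments.split('\n'):
--         line = line.strip()
--         if line.startswith('#'):
--             current_comment = line
--             code_comment_dict[current_comment] = []
--         elif current_comment is not None:
--             code_comment_dict[current_comment].append(line)
--
--     return code_comment_dict
-- ===== SOURCE B (Python) =====
-- def separate_comments_from_code(code_with_comments):
--     lines = [l.strip() for l in code_with_comments.split('\n')]
--     idxs = [i for i, l in enumerate(lines) if l.startswith('#')]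
--     result = {}
--     for i, nxt in zip(idxs, idxs[1:] + [len(lines)]):
--         result[lines[i]] = lines[i + 1:nxt]
--     return result
-- ===== Notes on version B (the rewrite author's own statement) =====
-- stated objective: alternative
-- what changed: A's single running-accumulator pass (current-comment state, appending line by line) is replaced by a two-phase index/slice decomposition: strip all lines, collect the comment-line indices once, then slice each group of lines between consecutive comment indices and assign it to its comment key.
import Mathlib
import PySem

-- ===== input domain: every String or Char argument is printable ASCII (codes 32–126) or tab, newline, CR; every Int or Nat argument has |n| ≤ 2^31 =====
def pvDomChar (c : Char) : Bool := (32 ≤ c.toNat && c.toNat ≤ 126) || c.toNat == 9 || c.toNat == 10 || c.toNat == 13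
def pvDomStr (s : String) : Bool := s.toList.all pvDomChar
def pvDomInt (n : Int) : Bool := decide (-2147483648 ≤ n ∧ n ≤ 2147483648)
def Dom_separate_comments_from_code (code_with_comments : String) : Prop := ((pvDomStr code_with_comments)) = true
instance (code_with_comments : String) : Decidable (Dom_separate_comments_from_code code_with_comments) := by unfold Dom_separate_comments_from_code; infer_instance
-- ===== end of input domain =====

-- B replaces A's running-accumulator pass by a two-phase index/slice decomposition (collect comment
-- indices, then slice the groups between consecutive comment indices); objective: alternative.

-- ===== PORT A =====
-- the for-loop of A: state = (dict, current_comment); each line is stripped, a '#' line opens a new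
-- (reset) group, other lines are appended to the current group (dict append = Dict.modify, key always present)
def sacLoopA (ls : List String) (d : PySem.Dict String (List String)) (cur : Option String) :
    PySem.Dict String (List String) :=
  match ls, cur with
  | [], _ => d
  | line :: rest, cur =>
    let l := PySem.Str.strip line
    if PySem.Str.startswith l "#" then
      sacLoopA rest (d.insert l []) (some l)
    else
      match cur with
      | some c => sacLoopA rest (d.modify c [] (fun v => v ++ [l])) (some c)
      | none => sacLoopA rest d none

def separate_comments_from_code (code_with_comments : String) : List (String × List String) :=
  (sacLoopA ((PySem.Str.split? code_with_comments "\n").getD []) PySem.Dict.empty none).items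

-- ===== PORT B =====
def separate_comments_from_code_alt (code_with_comments : String) : List (String × List String) :=
  let lines := ((PySem.Str.split? code_with_comments "\n").getD []).map PySem.Str.strip
  let idxs := ((PySem.List.enumerate lines).filter
      (fun p => PySem.Str.startswith p.2 "#")).map (fun p => p.1)
  let result := (List.zip idxs (idxs.drop 1 ++ [(lines.length : Int)])).foldl
      (fun d p => d.insert (PySem.List.pyGetD lines p.1 "")
        (PySem.List.slice lines (some (p.1 + 1)) (some p.2))) PySem.Dict.empty
  result.items

-- ===== PRECONDITION & SPEC =====
def Spec_separate_comments_from_code (code_with_comments : String) (out : List (String × List String)) : Prop := out = separate_comments_from_code_alt code_with_comments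
instance (code_with_comments : String) (out : List (String × List String)) : Decidable (Spec_separate_comments_from_code code_with_comments out) := by unfold Spec_separate_comments_from_code; infer_instance

-- ===== CLAIM (what is proved, stated in full; the proofs are below) =====
def Claim_equal_separate_comments_from_code : Prop := ∀ (code_with_comments : String), Dom_separate_comments_from_code code_with_comments → Spec_separate_comments_from_code code_with_comments (separate_comments_from_code code_with_comments)

-- ===== LEMMAS AND PROOFS =====

-- shared decomposition: the (comment, group) pairs in occurrence order, over already-stripped lines
def ppn (l : String) : Bool := !(PySem.Str.startswith l "#")

def pairsOf : List String → List (String × List String)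
  | [] => []
  | x :: xs =>
    if PySem.Str.startswith x "#" then (x, xs.takeWhile ppn) :: pairsOf xs else pairsOf xs

def insF (d : PySem.Dict String (List String)) (p : String × List String) :
    PySem.Dict String (List String) := d.insert p.1 p.2

-- A's loop with the stripping factored out
def loopS (ls : List String) (d : PySem.Dict String (List String)) (cur : Option String) :
    PySem.Dict String (List String) :=
  match ls, cur with
  | [], _ => d
  | l :: rest, cur =>
    if PySem.Str.startswith l "#" then
      loopS rest (d.insert l []) (some l)
    else
      match cur with
      | some c => loopS rest (d.modify c [] (fun v => v ++ [l])) (some c)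
      | none => loopS rest d none

theorem sacLoopA_eq_loopS (ls : List String) (d : PySem.Dict String (List String))
    (cur : Option String) : sacLoopA ls d cur = loopS (ls.map PySem.Str.strip) d cur := by
  induction ls generalizing d cur with
  | nil => cases cur <;> rfl
  | cons x xs ih =>
    simp only [sacLoopA, loopS, List.map_cons]
    split_ifs with h
    · exact ih _ _
    · cases cur with
      | none => exact ih _ _
      | some c => exact ih _ _

theorem modify_insert_self (d : PySem.Dict String (List String)) (k : String)
    (v : List String) (f : List String → List String) :
    (d.insert k v).modify k [] f = d.insert k (f v) := by
  unfold PySem.Dict.modify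
  rw [PySem.Dict.getD_insert_self, PySem.Dict.insert_insert_self]

theorem loopS_some (ls : List String) (d : PySem.Dict String (List String))
    (c : String) (g : List String) :
    loopS ls (d.insert c g) (some c) =
      ((c, g ++ ls.takeWhile ppn) :: pairsOf ls).foldl insF d := by
  induction ls generalizing d c g with
  | nil => simp [loopS, pairsOf, insF]
  | cons x xs ih =>
    by_cases h : PySem.Str.startswith x "#"
    · simp only [loopS, h, if_pos, pairsOf, List.takeWhile]
      have hpx : ppn x = false := by unfold ppn; rw [h]; rfl
      rw [ih (d.insert c g) x []]
      simp [hpx, List.foldl_cons, insF]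
    · simp only [loopS, h, pairsOf, List.takeWhile]
      have hpx : ppn x = true := by unfold ppn; rw [Bool.eq_false_iff.mpr h]; rfl
      rw [modify_insert_self, ih d c (g ++ [x])]
      simp [hpx, List.append_assoc]

theorem loopS_none (ls : List String) (d : PySem.Dict String (List String)) :
    loopS ls d none = (pairsOf ls).foldl insF d := by
  induction ls generalizing d with
  | nil => rfl
  | cons x xs ih =>
    by_cases h : PySem.Str.startswith x "#"
    · simp only [loopS, h, if_pos, pairsOf]
      rw [loopS_some xs d x []]
      simp [insF]
    · simp only [loopS, h, pairsOf]
      exact ih d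

-- B side: the list of comment indices starting at offset s
def cIdxs (ls : List String) (s : Int) : List Int :=
  ((PySem.List.enumerate ls s).filter (fun p => PySem.Str.startswith p.2 "#")).map (fun p => p.1)

theorem cIdxs_cons (x : String) (xs : List String) (s : Int) :
    cIdxs (x :: xs) s =
      if PySem.Str.startswith x "#" then s :: cIdxs xs (s + 1) else cIdxs xs (s + 1) := by
  simp only [cIdxs, PySem.List.enumerate_cons, List.filter_cons]
  split_ifs with h <;> simp

theorem ppn_true (x : String) (h : PySem.Str.startswith x "#" = false) : ppn x = true := by
  unfold ppn; rw [h]; rfl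

theorem ppn_false (x : String) (h : PySem.Str.startswith x "#" = true) : ppn x = false := by
  unfold ppn; rw [h]; rfl

theorem takeWhile_of_cIdxs_nil (xs : List String) (s : Int) (h : cIdxs xs s = []) :
    xs.takeWhile ppn = xs := by
  induction xs generalizing s with
  | nil => rfl
  | cons x xs ih =>
    rw [cIdxs_cons] at h
    cases hx : PySem.Str.startswith x "#" with
    | true => rw [hx] at h; simp at h
    | false =>
      rw [hx] at h; simp only [Bool.false_eq_true, if_false] at h
      rw [List.takeWhile_cons, ppn_true x hx]
      simp [ih (s + 1) h]

theorem cIdxs_head (xs : List String) (s : Nat) (j : Int) (t : List Int)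
    (h : cIdxs xs (s : Int) = j :: t) :
    ∃ k : Nat, j = ((s + k : Nat) : Int) ∧ xs.takeWhile ppn = xs.take k := by
  induction xs generalizing s j t with
  | nil => simp [cIdxs, PySem.List.enumerate] at h
  | cons x xs ih =>
    rw [cIdxs_cons] at h
    cases hx : PySem.Str.startswith x "#" with
    | true =>
      rw [hx] at h; simp only [if_true] at h
      refine ⟨0, ?_, ?_⟩
      · have := (List.cons.injEq _ _ _ _ ▸ h).1
        simp [← this]
      · simp [ppn_false x hx]
    | false =>
      rw [hx] at h; simp only [Bool.false_eq_true, if_false] at h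
      have h' : cIdxs xs ((s + 1 : Nat) : Int) = j :: t := by
        have hc : (((s + 1 : Nat)) : Int) = (s : Int) + 1 := by push_cast; ring
        rw [hc]; exact h
      obtain ⟨k, hk1, hk2⟩ := ih (s + 1) j t h'
      refine ⟨k + 1, ?_, ?_⟩
      · rw [hk1]; congr 1; omega
      · rw [List.takeWhile_cons, ppn_true x hx]
        simp [hk2]

-- the central B-side lemma: zipping consecutive comment indices and slicing gives exactly pairsOf
theorem pairsOf_cons (x : String) (xs : List String) :
    pairsOf (x :: xs) =
      if PySem.Str.startswith x "#" then (x, xs.takeWhile ppn) :: pairsOf xs else pairsOf xs := rfl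

theorem pairsOf_eq_nil_of_cIdxs_nil (xs : List String) (s : Int) (h : cIdxs xs s = []) :
    pairsOf xs = [] := by
  induction xs generalizing s with
  | nil => rfl
  | cons x xs ih =>
    rw [cIdxs_cons] at h
    cases hx : PySem.Str.startswith x "#" with
    | true => rw [hx] at h; simp at h
    | false =>
      rw [hx] at h; simp only [Bool.false_eq_true, if_false] at h
      rw [pairsOf_cons, hx]
      simp [ih (s + 1) h]

theorem zip_slice_eq_pairsOf (ls : List String) (s : Nat) (L : List String)
    (hL : L.drop s = ls) :
    (List.zip (cIdxs ls (s : Int)) ((cIdxs ls (s : Int)).drop 1 ++ [(L.length : Int)])).map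
      (fun p => (PySem.List.pyGetD L p.1 "",
        PySem.List.slice L (some (p.1 + 1)) (some p.2))) = pairsOf ls := by
  induction ls generalizing s with
  | nil => simp [cIdxs, PySem.List.enumerate, pairsOf]
  | cons x xs ih =>
    have hs : s < L.length := by
      by_contra hc
      rw [List.drop_eq_nil_of_le (by omega)] at hL
      exact (List.cons_ne_nil x xs) hL.symm
    have hdrop1 : L.drop (s + 1) = xs := by
      rw [← List.drop_drop, hL]; rfl
    have hgetx : L[s]? = some x := by
      have h0 := congrArg (fun t => t[0]?) hL
      simpa [List.getElem?_drop] using h0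
    have hget : PySem.List.pyGetD L ((s : Nat) : Int) "" = x := by
      rw [PySem.List.pyGetD_natCast]
      simp [List.getD, hgetx]
    have hlen : L.length = s + 1 + xs.length := by
      have := congrArg List.length hdrop1
      simp at this; omega
    have hs1 : ((s : Int) + 1) = (((s + 1 : Nat)) : Int) := by push_cast; ring
    rw [cIdxs_cons, pairsOf_cons]
    cases hx : PySem.Str.startswith x "#" with
    | false =>
      simp only [Bool.false_eq_true, if_false]
      have hrec := ih (s + 1) hdrop1
      rw [← hs1] at hrec
      exact hrec
    | true =>
      simp only [if_true]
      cases ht : cIdxs xs ((s : Int) + 1) with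
      | nil =>
        have htn : cIdxs xs (((s + 1 : Nat)) : Int) = [] := by rw [← hs1]; exact ht
        have hall : xs.takeWhile ppn = xs := takeWhile_of_cIdxs_nil xs _ htn
        have hnil : pairsOf xs = [] := pairsOf_eq_nil_of_cIdxs_nil xs _ htn
        simp only [List.drop_succ_cons, List.drop_nil, List.nil_append, List.zip_cons_cons,
          List.zip_nil_right, List.map_cons, List.map_nil]
        rw [hget]
        have hslice : PySem.List.slice L (some ((s : Int) + 1)) (some (L.length : Int)) = xs := by
          rw [hs1]
          rw [show ((L.length : Int)) = (((L.length : Nat) : Nat) : Int) from rfl]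
          rw [PySem.List.slice_natCast, hdrop1]
          rw [List.take_of_length_le (by omega)]
        rw [hslice, hall, hnil]
      | cons j t =>
        have htn : cIdxs xs (((s + 1 : Nat)) : Int) = j :: t := by rw [← hs1]; exact ht
        obtain ⟨k, hj, htk⟩ := cIdxs_head xs (s + 1) j t htn
        have hzip := ih (s + 1) hdrop1
        rw [htn] at hzip
        simp only [List.drop_succ_cons, List.drop_zero]
        rw [List.cons_append, List.zip_cons_cons, List.map_cons]
        have hfirst : (PySem.List.pyGetD L ((s : Nat) : Int) "",
            PySem.List.slice L (some (((s : Nat) : Int) + 1)) (some j)) = (x, xs.takeWhile ppn) := by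
          rw [hget, hj, hs1, PySem.List.slice_natCast, hdrop1, htk]
          simp [show s + 1 + k - (s + 1) = k from by omega]
        rw [hfirst]
        congr 1

-- ===== VERDICT (by name: the statement is the Claim_ definition above) =====
theorem separate_comments_from_code_spec : Claim_equal_separate_comments_from_code := by
  intro s _
  unfold Spec_separate_comments_from_code
  unfold separate_comments_from_code separate_comments_from_code_alt
  rw [sacLoopA_eq_loopS, loopS_none]
  set lines := ((PySem.Str.split? s "\n").getD []).map PySem.Str.strip with hlines
  congr 1
  have hz := zip_slice_eq_pairsOf lines 0 lines (by simp)
  simp only [Nat.cast_zero] at hz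
  rw [← hz, List.foldl_map]
  rfl
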